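-- pv_equiv track=rewrite | github.com/Arthur-Lefevre-dev/Redwood-One | core/vast_ai.py | country_code_from_vast_geolocation
-- ===== SOURCE A (Python) =====
-- from typing import Any, Dict, List, Optional
--
-- def country_code_from_vast_geolocation(geo: Any) -> Optional[str]:
--     """Vast returns geolocation like 'Shanghai, CN' — return trailing alpha-2 if present."""
--     if not isinstance(geo, str):
--         return None
--     parts = [p.strip() for p in geo.split(",") if p.strip()]
--     if not parts:
--         return None
--     last = parts[-1].strip().upper()
--     if len(last) == 2 and last.isalpha():
--         return last
--     return None
-- ===== SOURCE B (Python) =====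
-- def country_code_from_vast_geolocation(geo):
--     """Vast returns geolocation like 'Shanghai, CN' — return trailing alpha-2 if present."""
--     if not isinstance(geo, str):
--         return None
--     s = geo.rstrip(", \t\n\r")
--     if not s:
--         return None
--     last = s.rsplit(",", 1)[-1].strip().upper()
--     if len(last) == 2 and last.isalpha():
--         return last
--     return None
-- ===== Notes on version B (the rewrite author's own statement) =====
-- stated objective: idiomatic
-- what changed: Instead of splitting the string into a list of comma-separated pieces, stripping and filtering every piece and taking the last, B strips trailing commas and whitespace off the right end in one rstrip call and takes the suffix after the last comma with one rsplit call - no intermediate list of parts.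
import Mathlib
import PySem

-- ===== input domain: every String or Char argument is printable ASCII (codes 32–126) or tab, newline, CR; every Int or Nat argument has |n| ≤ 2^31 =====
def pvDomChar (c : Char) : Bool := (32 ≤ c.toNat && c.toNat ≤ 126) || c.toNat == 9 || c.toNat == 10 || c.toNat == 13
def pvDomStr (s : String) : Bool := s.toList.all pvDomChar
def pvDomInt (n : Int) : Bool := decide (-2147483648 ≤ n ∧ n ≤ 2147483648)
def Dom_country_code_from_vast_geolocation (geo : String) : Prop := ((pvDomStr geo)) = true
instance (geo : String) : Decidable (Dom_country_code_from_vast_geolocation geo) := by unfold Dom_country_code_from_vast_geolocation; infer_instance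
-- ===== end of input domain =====

-- B replaces split-into-list + strip-filter by one rstrip of trailing commas/whitespace plus one rsplit — no intermediate list; objective: idiomatic/alternative (same cost).


-- ===== PORT A =====
-- literal port of A on the character list (the isinstance guard is vacuous: geo : String)
def pvAcore (cs : List Char) : Option String :=
  -- parts = [p.strip() for p in geo.split(",") if p.strip()]
  let parts := ((PySem.Chars.splitOn cs [',']).map PySem.Chars.strip).filter (fun p => p ≠ [])
  -- if not parts: return None;  last = parts[-1].strip().upper()
  match parts.getLast? with
  | none => none
  | some l =>
    let last := PySem.Chars.upper (PySem.Chars.strip l)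
    -- if len(last) == 2 and last.isalpha(): return last; return None
    if last.length = 2 ∧ PySem.Chars.strIsalpha last = true then some (String.ofList last) else none

def country_code_from_vast_geolocation (geo : String) : Option String :=
  pvAcore geo.toList

-- ===== PORT B =====
-- the character set of B's rstrip(", \t\n\r")
def pvJunk (c : Char) : Bool := c == ',' || c == ' ' || c == '\t' || c == '\n' || c == '\r'

-- literal port of B on the character list
def pvBcore (cs : List Char) : Option String :=
  -- s = geo.rstrip(", \t\n\r")   (hand port of rstrip(chars): drop those characters from the right; exact)
  let s := (cs.reverse.dropWhile pvJunk).reverse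
  -- if not s: return None
  if s = [] then none
  else
    -- s.rsplit(",", 1)[-1]   (hand port: the suffix of s after its last ','; exact)
    let seg := (s.reverse.takeWhile (fun c => c ≠ ',')).reverse
    -- last = ….strip().upper()
    let last := PySem.Chars.upper (PySem.Chars.strip seg)
    if last.length = 2 ∧ PySem.Chars.strIsalpha last = true then some (String.ofList last) else none

def country_code_from_vast_geolocation_alt (geo : String) : Option String :=
  pvBcore geo.toList

-- ===== PRECONDITION & SPEC =====
def Spec_country_code_from_vast_geolocation (geo : String) (out : Option String) : Prop := out = country_code_from_vast_geolocation_alt geo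
instance (geo : String) (out : Option String) : Decidable (Spec_country_code_from_vast_geolocation geo out) := by unfold Spec_country_code_from_vast_geolocation; infer_instance

-- ===== CLAIM (what is proved, stated in full; the proofs are below) =====
def Claim_equal_country_code_from_vast_geolocation : Prop := ∀ (geo : String), Dom_country_code_from_vast_geolocation geo → Spec_country_code_from_vast_geolocation geo (country_code_from_vast_geolocation geo)

-- ===== LEMMAS AND PROOFS =====

-- proof-side model of geo.split(",") : simple structural recursion
def split1 : List Char → List (List Char)
  | [] => [[]]
  | c :: rest => if c = ',' then [] :: split1 rest else (split1 rest).modifyHead (c :: ·)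

theorem split1_ne_nil (w : List Char) : split1 w ≠ [] := by
  induction w with
  | nil => simp [split1]
  | cons c rest ih =>
    simp only [split1]
    split
    · simp
    · cases h : split1 rest with
      | nil => exact absurd h ih
      | cons a t => simp [List.modifyHead]

theorem go_spec (fuel : Nat) (l cur : List Char) (acc : List (List Char)) (h : l.length ≤ fuel) :
    PySem.Chars.splitOn.go [','] fuel l cur acc
      = acc.reverse ++ (split1 l).modifyHead (fun t => cur.reverse ++ t) := by
  induction fuel generalizing l cur acc with
  | zero =>
    have : l = [] := by
      cases l with
      | nil => rfl
      | cons a t => simp at h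
    subst this
    simp [PySem.Chars.splitOn.go, split1, List.modifyHead]
  | succ f ih =>
    cases l with
    | nil => simp [PySem.Chars.splitOn.go, split1, List.modifyHead]
    | cons c rest =>
      simp only [PySem.Chars.splitOn.go]
      by_cases hc : c = ','
      · subst hc
        rw [if_pos (by simp [List.isPrefixOf])]
        rw [ih _ _ _ (by simpa using Nat.le_of_succ_le_succ (by simpa using h))]
        rw [split1, if_pos rfl]
        cases h' : split1 rest <;> simp [List.modifyHead, h']
      · rw [if_neg (by simp [List.isPrefixOf, Ne.symm hc])]
        rw [ih _ _ _ (by simpa using Nat.le_of_succ_le_succ (by simpa using h))]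
        rw [split1]
        rw [if_neg hc]
        cases h' : split1 rest with
        | nil => exact absurd h' (split1_ne_nil rest)
        | cons a t => simp [List.modifyHead]

theorem splitOn_comma (w : List Char) : PySem.Chars.splitOn w [','] = split1 w := by
  unfold PySem.Chars.splitOn
  rw [go_spec _ _ _ _ (by omega)]
  cases h : split1 w <;> simp

-- right-append equations for split1
theorem split1_concat_comma (w : List Char) : split1 (w ++ [',']) = split1 w ++ [[]] := by
  induction w with
  | nil => simp [split1]
  | cons c rest ih =>
    simp only [List.cons_append, split1, ih]
    split
    · rfl
    · cases h : split1 rest with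
      | nil => exact absurd h (split1_ne_nil rest)
      | cons a t => simp [List.modifyHead]

theorem split1_concat (w : List Char) (a : Char) (ha : a ≠ ',') :
    split1 (w ++ [a]) = (split1 w).modifyLast (· ++ [a]) := by
  induction w with
  | nil =>
    simp only [List.nil_append, split1, if_neg ha, List.modifyHead]
    rw [show ([[]] : List (List Char)) = [] ++ [[]] from rfl, List.modifyLast_concat]
    rfl
  | cons c rest ih =>
    simp only [List.cons_append, split1, ih]
    split
    · rw [show ([] :: split1 rest) = [[]] ++ split1 rest from rfl,
          List.modifyLast_append_of_right_ne_nil _ [[]] (split1 rest) (split1_ne_nil rest)]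
      rfl
    · cases h : split1 rest with
      | nil => exact absurd h (split1_ne_nil rest)
      | cons b t =>
        cases t with
        | nil => simp [List.modifyLast, List.modifyLast.go, List.modifyHead]
        | cons b' t' =>
          simp only [List.modifyHead]
          rw [show b :: b' :: t' = [b] ++ (b' :: t') by rfl,
              List.modifyLast_append_of_right_ne_nil _ [b] _ (by simp),
              show (c :: b) :: b' :: t' = [c :: b] ++ (b' :: t') by rfl,
              List.modifyLast_append_of_right_ne_nil _ [c :: b] _ (by simp)]
          simp

-- the suffix of w after its last comma (B's rsplit piece)
def twf (w : List Char) : List Char := (w.reverse.takeWhile (fun c => c ≠ ',')).reverse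

theorem twf_concat_comma (w : List Char) : twf (w ++ [',']) = [] := by
  simp [twf]

theorem twf_concat (w : List Char) (a : Char) (ha : a ≠ ',') : twf (w ++ [a]) = twf w ++ [a] := by
  simp [twf, ha]

-- split1 w always ends with exactly that suffix
theorem split1_eq_concat_twf (w : List Char) : ∃ D, split1 w = D ++ [twf w] := by
  induction w using List.reverseRecOn with
  | nil => exact ⟨[], by simp [split1, twf]⟩
  | append_singleton w a ih =>
    obtain ⟨D, hD⟩ := ih
    by_cases ha : a = ','
    · subst ha
      exact ⟨split1 w, by rw [split1_concat_comma, twf_concat_comma]⟩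
    · refine ⟨D, ?_⟩
      rw [split1_concat w a ha, hD, List.modifyLast_concat, twf_concat w a ha]

-- strip facts
theorem rstrip_concat_space (u : List Char) (a : Char) (ha : PySem.Chars.isspace a = true) :
    PySem.Chars.rstrip (u ++ [a]) = PySem.Chars.rstrip u := by
  simp [PySem.Chars.rstrip, ha]

theorem strip_concat_space (u : List Char) (a : Char) (ha : PySem.Chars.isspace a = true) :
    PySem.Chars.strip (u ++ [a]) = PySem.Chars.strip u := by
  unfold PySem.Chars.strip PySem.Chars.lstrip
  rw [List.dropWhile_append]
  split
  · next h =>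
    simp only [List.isEmpty_iff] at h
    rw [h]
    simp [ha, PySem.Chars.rstrip]
  · exact rstrip_concat_space _ _ ha

theorem strip_concat_nonspace_ne_nil (u : List Char) (a : Char) (ha : PySem.Chars.isspace a = false) :
    PySem.Chars.strip (u ++ [a]) ≠ [] := by
  unfold PySem.Chars.strip PySem.Chars.lstrip
  rw [List.dropWhile_append]
  split
  · simp [ha, PySem.Chars.rstrip]
  · simp [PySem.Chars.rstrip, ha]

theorem dropWhile_idem_pv {α : Type} (p : α → Bool) (l : List α) :
    (l.dropWhile p).dropWhile p = l.dropWhile p := by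
  induction l with
  | nil => simp
  | cons a t ih => by_cases h : p a <;> simp [h, ih]

theorem charEq (a b : Char) : (a == b) = decide (a.toNat = b.toNat) := by
  rw [Bool.eq_iff_iff]
  simp only [beq_iff_eq, decide_eq_true_eq, Char.toNat]
  constructor
  · rintro rfl; rfl
  · intro h; exact Char.ext (UInt32.toNat_inj.mp (h : a.val.toNat = b.val.toNat))

theorem lstrip_rstrip_of_lstrip_fix (y : List Char) (hy : PySem.Chars.lstrip y = y) :
    PySem.Chars.lstrip (PySem.Chars.rstrip y) = PySem.Chars.rstrip y := by
  cases y with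
  | nil => simp [PySem.Chars.lstrip, PySem.Chars.rstrip]
  | cons c ys =>
    have hc : PySem.Chars.isspace c = false := by
      by_contra h
      simp only [Bool.not_eq_false] at h
      simp [PySem.Chars.lstrip, h] at hy
      have := congrArg List.length hy
      simp at this
      have := List.length_dropWhile_le PySem.Chars.isspace ys
      omega
    unfold PySem.Chars.rstrip
    simp only [List.reverse_cons]
    rw [List.dropWhile_append]
    split
    · simp [hc, PySem.Chars.lstrip]
    · simp [PySem.Chars.lstrip, hc]

theorem rstrip_idem (z : List Char) : PySem.Chars.rstrip (PySem.Chars.rstrip z) = PySem.Chars.rstrip z := by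
  unfold PySem.Chars.rstrip
  rw [List.reverse_reverse, dropWhile_idem_pv]

theorem strip_idem (s : List Char) : PySem.Chars.strip (PySem.Chars.strip s) = PySem.Chars.strip s := by
  have hy : PySem.Chars.lstrip (PySem.Chars.lstrip s) = PySem.Chars.lstrip s := by
    simpa [PySem.Chars.lstrip] using dropWhile_idem_pv PySem.Chars.isspace s
  show PySem.Chars.rstrip (PySem.Chars.lstrip (PySem.Chars.rstrip (PySem.Chars.lstrip s))) = _
  rw [lstrip_rstrip_of_lstrip_fix _ hy, rstrip_idem]
  rfl

-- within the domain, Python's whitespace is exactly space/tab/newline/CR, so B's rstrip set is comma-or-whitespace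
theorem dom_junk (a : Char) (h : pvDomChar a = true) :
    pvJunk a = (a == ',' || PySem.Chars.isspace a) := by
  simp only [pvDomChar, Bool.or_eq_true, Bool.and_eq_true, decide_eq_true_eq, beq_iff_eq] at h
  simp only [pvJunk, PySem.Chars.isspace, charEq,
    show (','.toNat = 44) from rfl, show (' '.toNat = 32) from rfl,
    show ('\t'.toNat = 9) from rfl, show ('\n'.toNat = 10) from rfl, show ('\r'.toNat = 13) from rfl]
  rw [Bool.eq_iff_iff]
  simp only [Bool.or_eq_true, Bool.and_eq_true, decide_eq_true_eq]
  omega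

-- main equivalence on character lists
theorem core_eq (cs : List Char) (h : cs.all pvDomChar = true) : pvAcore cs = pvBcore cs := by
  induction cs using List.reverseRecOn with
  | nil => decide
  | append_singleton w a ih =>
    have hw : w.all pvDomChar = true := by simp [List.all_append] at h; exact (by simpa using h.1)
    have hadom : pvDomChar a = true := by simp [List.all_append] at h; simpa using h.2
    by_cases hj : pvJunk a = true
    · -- a is a comma or (domain) whitespace: both sides ignore it
      have hB : pvBcore (w ++ [a]) = pvBcore w := by
        simp only [pvBcore, List.reverse_append, List.reverse_cons, List.reverse_nil,
          List.nil_append, List.singleton_append, List.dropWhile_cons, hj, if_pos]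
      rw [hB, ← ih hw]
      rcases (by rw [dom_junk a hadom] at hj; simpa using hj : a = ',' ∨ PySem.Chars.isspace a = true) with hc | hs
      · subst hc
        simp only [pvAcore, splitOn_comma, split1_concat_comma]
        simp [List.filter_append, PySem.Chars.strip, PySem.Chars.lstrip, PySem.Chars.rstrip]
      · have ha : a ≠ ',' := by intro e; subst e; exact absurd hs (by decide)
        obtain ⟨D, hD⟩ := split1_eq_concat_twf w
        simp only [pvAcore, splitOn_comma, split1_concat w a ha, hD, List.modifyLast_concat]
        rw [List.map_append, List.map_append, List.filter_append, List.filter_append]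
        simp [strip_concat_space _ _ hs]
    · -- a is an ordinary character: it is the end of the last non-empty part
      have ha : a ≠ ',' := by intro e; subst e; simp [pvJunk] at hj
      have hs : PySem.Chars.isspace a = false := by
        rw [dom_junk a hadom] at hj
        simpa [ha] using hj
      obtain ⟨D, hD⟩ := split1_eq_concat_twf w
      have hseg : twf (w ++ [a]) = twf w ++ [a] := twf_concat w a ha
      have hne : PySem.Chars.strip (twf w ++ [a]) ≠ [] := strip_concat_nonspace_ne_nil _ _ hs
      -- A side
      have hA : pvAcore (w ++ [a])
          = (let last := PySem.Chars.upper (PySem.Chars.strip (twf w ++ [a]));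
             if last.length = 2 ∧ PySem.Chars.strIsalpha last = true then some (String.ofList last) else none) := by
        simp only [pvAcore, splitOn_comma, split1_concat w a ha, hD, List.modifyLast_concat,
          List.map_append, List.filter_append]
        rw [show List.filter (fun p => decide ¬p = []) (List.map PySem.Chars.strip [twf w ++ [a]])
              = [PySem.Chars.strip (twf w ++ [a])] by simp [hne]]
        rw [List.getLast?_concat]
        simp only [strip_idem]
      -- B side
      have hsB : ((w ++ [a]).reverse.dropWhile pvJunk).reverse = w ++ [a] := by
        simp only [List.reverse_append, List.reverse_cons, List.reverse_nil, List.nil_append,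
          List.singleton_append, List.dropWhile_cons, hj]
        simp
      have hB : pvBcore (w ++ [a])
          = (let last := PySem.Chars.upper (PySem.Chars.strip (twf w ++ [a]));
             if last.length = 2 ∧ PySem.Chars.strIsalpha last = true then some (String.ofList last) else none) := by
        simp only [pvBcore, hsB]
        rw [if_neg (by simp)]
        have : ((w ++ [a]).reverse.takeWhile (fun c => c ≠ ',')).reverse = twf w ++ [a] := by
          rw [← hseg]; rfl
        rw [this]
      rw [hA, hB]

-- ===== VERDICT (by name: the statement is the Claim_ definition above) =====
theorem country_code_from_vast_geolocation_spec : Claim_equal_country_code_from_vast_geolocation := by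
  intro geo hdom
  unfold Spec_country_code_from_vast_geolocation country_code_from_vast_geolocation country_code_from_vast_geolocation_alt
  exact core_eq geo.toList hdom
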